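-- pv_equiv track=rewrite | github.com/NaamaMika/boss-sniffer | step2_manager.py | indexs_app
-- ===== SOURCE A (Python) =====
-- def indexs_app(update_html_code):
--     """Find two indexs to set the information of the applications(softwares)
--     :param update_html_code: html code
--     :return: two indexs
--     """
--     index_keys = 0
--     index_values = 0
--     for i in range(len(update_html_code)):
--         if "labels: %%APPS_KEYS%%" in update_html_code[i]:
--             index_keys = i
--         if "data: %%APPS_VALUES%%" in update_html_code[i]:
--             index_values = i
--     return index_keys, index_values
-- ===== SOURCE B (Python) =====
-- def indexs_app(update_html_code):
--     """Find two indexs to set the information of the applications(softwares)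
--     :param update_html_code: html code
--     :return: two indexs
--     """
--     index_keys = 0
--     index_values = 0
--     found_keys = False
--     found_values = False
--     for i, line in reversed(list(enumerate(update_html_code))):
--         if not found_keys and "labels: %%APPS_KEYS%%" in line:
--             index_keys = i
--             found_keys = True
--         if not found_values and "data: %%APPS_VALUES%%" in line:
--             index_values = i
--             found_values = True
--         if found_keys and found_values:
--             break
--     return index_keys, index_values
-- ===== Notes on version B (the rewrite author's own statement) =====
-- stated objective: alternative
-- what changed: Instead of scanning forward and overwriting each index on every hit, B scans from the last line backward with found flags, records only the first (i.e. last-in-document) hit per marker and breaks as soon as both markers are found.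
import Mathlib
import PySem

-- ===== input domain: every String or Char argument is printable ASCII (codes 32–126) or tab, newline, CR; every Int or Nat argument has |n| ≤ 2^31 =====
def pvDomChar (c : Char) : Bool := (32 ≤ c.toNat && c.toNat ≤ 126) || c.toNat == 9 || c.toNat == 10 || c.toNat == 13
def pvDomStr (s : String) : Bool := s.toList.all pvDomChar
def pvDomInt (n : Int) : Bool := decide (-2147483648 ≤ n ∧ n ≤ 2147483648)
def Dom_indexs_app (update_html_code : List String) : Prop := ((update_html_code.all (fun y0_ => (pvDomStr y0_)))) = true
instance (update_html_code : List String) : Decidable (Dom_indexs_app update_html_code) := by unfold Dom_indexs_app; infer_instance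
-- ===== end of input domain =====

-- B scans the enumerated lines in reverse with found flags and an early break; A scans forward overwriting. Alternative decomposition, same results.
-- ===== PORT A =====
def indexs_app (update_html_code : List String) : Int × Int :=
  (PySem.List.pyRange 0 (update_html_code.length : Int) 1).foldl
    (fun st i =>
      let ik := if PySem.Str.isIn "labels: %%APPS_KEYS%%" (PySem.List.pyGetD update_html_code i "") then i else st.1
      let iv := if PySem.Str.isIn "data: %%APPS_VALUES%%" (PySem.List.pyGetD update_html_code i "") then i else st.2
      (ik, iv)) (0, 0)

-- ===== PORT B =====
-- the reversed loop with early break: state (index_keys, index_values, found_keys, found_values)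
def indexsAppRevLoop : List (Int × String) → Int → Int → Bool → Bool → Int × Int
  | [], ik, iv, _, _ => (ik, iv)
  | (i, line) :: rest, ik, iv, fk, fv =>
      let hitK := !fk && PySem.Str.isIn "labels: %%APPS_KEYS%%" line
      let ik' := if hitK then i else ik
      let fk' := fk || hitK
      let hitV := !fv && PySem.Str.isIn "data: %%APPS_VALUES%%" line
      let iv' := if hitV then i else iv
      let fv' := fv || hitV
      if fk' && fv' then (ik', iv')
      else indexsAppRevLoop rest ik' iv' fk' fv'

def indexs_app_alt (update_html_code : List String) : Int × Int :=
  indexsAppRevLoop (PySem.List.enumerate update_html_code).reverse 0 0 false false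

-- ===== PRECONDITION & SPEC =====
def Spec_indexs_app (update_html_code : List String) (out : Int × Int) : Prop := out = indexs_app_alt update_html_code
instance (update_html_code : List String) (out : Int × Int) : Decidable (Spec_indexs_app update_html_code out) := by unfold Spec_indexs_app; infer_instance

-- ===== CLAIM (what is proved, stated in full; the proofs are below) =====
def Claim_equal_indexs_app : Prop := ∀ (update_html_code : List String), Dom_indexs_app update_html_code → Spec_indexs_app update_html_code (indexs_app update_html_code)

-- ===== LEMMAS AND PROOFS =====

def pvHitK (p : Int × String) : Bool := PySem.Str.isIn "labels: %%APPS_KEYS%%" p.2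
def pvHitV (p : Int × String) : Bool := PySem.Str.isIn "data: %%APPS_VALUES%%" p.2

-- B's reversed loop returns, per marker, the first hit in its input (unless the flag is set).
set_option maxRecDepth 8192 in
theorem revLoop_eq_find : ∀ (qs : List (Int × String)) (ik iv : Int) (fk fv : Bool),
    indexsAppRevLoop qs ik iv fk fv =
      ((if fk then ik else ((qs.find? pvHitK).map Prod.fst).getD ik),
       (if fv then iv else ((qs.find? pvHitV).map Prod.fst).getD iv)) := by
  intro qs
  induction qs with
  | nil => intro ik iv fk fv; simp [indexsAppRevLoop]
  | cons p rest ih =>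
      intro ik iv fk fv
      obtain ⟨i, line⟩ := p
      cases fk <;> cases fv <;>
        cases hK : PySem.Str.isIn "labels: %%APPS_KEYS%%" line <;>
        cases hV : PySem.Str.isIn "data: %%APPS_VALUES%%" line <;>
        (simp at hK hV;
         simp [indexsAppRevLoop, List.find?_cons, hK, hV, ih, pvHitK, pvHitV])

-- A's forward overwriting fold returns, per marker, the last hit (= first hit of the reverse).
theorem foldA_eq_find : ∀ (ps : List (Int × String)) (ik iv : Int),
    ps.foldl (fun (st : Int × Int) (p : Int × String) =>
        ((if pvHitK p then p.1 else st.1), (if pvHitV p then p.1 else st.2))) (ik, iv) =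
      (((ps.reverse.find? pvHitK).map Prod.fst).getD ik,
       ((ps.reverse.find? pvHitV).map Prod.fst).getD iv) := by
  intro ps
  induction ps with
  | nil => intro ik iv; simp
  | cons p rest ih =>
      intro ik iv
      simp only [List.foldl_cons, ih, List.reverse_cons, List.find?_append]
      cases hfK : rest.reverse.find? pvHitK <;> cases hfV : rest.reverse.find? pvHitV <;>
        cases hK : pvHitK p <;> cases hV : pvHitV p <;>
        simp only [hK, hV, List.find?_cons_of_pos, Option.some_or, Option.none_or,
          Option.map_some, Option.getD_some, if_true, if_false] <;>
        simp [hK, hV]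

-- ===== VERDICT (by name: the statement is the Claim_ definition above) =====
theorem indexs_app_spec : Claim_equal_indexs_app := by
  intro xs _
  show indexs_app xs = indexs_app_alt xs
  have hA : indexs_app xs =
      (PySem.List.enumerate xs).foldl (fun (st : Int × Int) (p : Int × String) =>
        ((if pvHitK p then p.1 else st.1), (if pvHitV p then p.1 else st.2))) (0, 0) := by
    rw [PySem.List.enumerate_eq_map_pyRange (d := ""), List.foldl_map]
    rfl
  rw [hA, foldA_eq_find, indexs_app_alt, revLoop_eq_find]
  simp
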